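-- pv_equiv track=rewrite | github.com/PeterO2309/Algorithm_Fridays | 02_remove_all_instances_from_array.py | getCountOfNonEqualElements
-- ===== SOURCE A (Python) =====
-- def getCountOfNonEqualElements(nums, val):
--     countOfNonEqualElements = 0
--
--     # When nums is null or undefined or an empty array
--     if nums == None or len(nums) ==0:
--        return countOfNonEqualElements
--
--     start = 0
--     end = len(nums) - 1
--
--     while(start <= end):
--         if start != end:
--         # When pointers are not equal,
--         # check for elements at nums[start] and nums[end]
--             if nums[start] != val:
--                 countOfNonEqualElements += 1
--             if nums[end] != val:
--                 countOfNonEqualElements += 1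
--
--         else:
--             # When pointers are equal, no need to duplicate the work
--             # because nums[start] = nums[end]
--             if nums[end] != val:
--                 countOfNonEqualElements += 1
--
--         start += 1  # Move start pointer forwards
--         end -= 1    # Move end pointer backwards
--
--     return countOfNonEqualElements
-- ===== SOURCE B (Python) =====
-- def getCountOfNonEqualElements(nums, val):
--     if not nums:
--         return 0
--     return sum(1 for x in nums if x != val)
-- ===== Notes on version B (the rewrite author's own statement) =====
-- stated objective: simpler
-- what changed: Replaces the bidirectional two-pointer sweep with its mid-index special case by a single forward pass summing 1 for each element != val.
import Mathlib
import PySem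

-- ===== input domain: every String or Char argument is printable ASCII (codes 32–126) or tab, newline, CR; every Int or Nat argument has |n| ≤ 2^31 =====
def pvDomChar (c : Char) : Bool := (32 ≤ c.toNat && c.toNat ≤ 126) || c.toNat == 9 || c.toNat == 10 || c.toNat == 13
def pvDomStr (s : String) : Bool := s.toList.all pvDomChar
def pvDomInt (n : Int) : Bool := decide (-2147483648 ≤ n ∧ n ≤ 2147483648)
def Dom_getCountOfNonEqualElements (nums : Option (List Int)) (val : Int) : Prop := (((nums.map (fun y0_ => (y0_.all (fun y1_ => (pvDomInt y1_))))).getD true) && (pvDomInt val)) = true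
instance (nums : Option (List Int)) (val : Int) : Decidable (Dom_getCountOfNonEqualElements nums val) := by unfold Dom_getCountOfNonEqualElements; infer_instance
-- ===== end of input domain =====

-- B replaces A's two-pointer sweep (with mid-index special case) by a single forward pass.

-- ===== PORT A =====
-- the while loop of A: indices start/end move inwards; indices are always in range, so getD is exact
def pvLoopA (xs : List Int) (val : Int) (s e : Nat) (c : Int) : Int :=
  if _h : s ≤ e then
    let c1 :=
      if s ≠ e then
        let c' := if xs.getD s 0 ≠ val then c + 1 else c
        if xs.getD e 0 ≠ val then c' + 1 else c'
      else
        if xs.getD e 0 ≠ val then c + 1 else c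
    pvLoopA xs val (s + 1) (e - 1) c1
  else c
  termination_by e + 1 - s
  decreasing_by omega

def getCountOfNonEqualElements (nums : Option (List Int)) (val : Int) : Int :=
  match nums with
  | none => 0
  | some xs => if xs.length = 0 then 0 else pvLoopA xs val 0 (xs.length - 1) 0

-- ===== PORT B =====
def getCountOfNonEqualElements_alt (nums : Option (List Int)) (val : Int) : Int :=
  match nums with
  | none => 0
  | some xs => xs.foldl (fun acc x => if x ≠ val then acc + 1 else acc) 0

-- ===== PRECONDITION & SPEC =====
def Spec_getCountOfNonEqualElements (nums : Option (List Int)) (val : Int) (out : Int) : Prop := out = getCountOfNonEqualElements_alt nums val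
instance (nums : Option (List Int)) (val : Int) (out : Int) : Decidable (Spec_getCountOfNonEqualElements nums val out) := by unfold Spec_getCountOfNonEqualElements; infer_instance

-- ===== CLAIM (what is proved, stated in full; the proofs are below) =====
def Claim_equal_getCountOfNonEqualElements : Prop := ∀ (nums : Option (List Int)) (val : Int), Dom_getCountOfNonEqualElements nums val → Spec_getCountOfNonEqualElements nums val (getCountOfNonEqualElements nums val)

-- ===== LEMMAS AND PROOFS =====

-- the segment of xs between indices s and e (inclusive)
def pvSeg (xs : List Int) (s e : Nat) : List Int := (xs.drop s).take (e + 1 - s)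

lemma pvSeg_single (xs : List Int) (s : Nat) (hs : s < xs.length) :
    pvSeg xs s s = [xs.getD s 0] := by
  unfold pvSeg
  have h1 : s + 1 - s = 1 := by omega
  rw [h1, List.drop_eq_getElem_cons hs, List.take_succ_cons, List.take_zero]
  simp [List.getD, List.getElem?_eq_getElem hs]

lemma pvSeg_step (xs : List Int) (s e : Nat) (hse : s < e) (he : e < xs.length) :
    pvSeg xs s e = xs.getD s 0 :: (pvSeg xs (s + 1) (e - 1) ++ [xs.getD e 0]) := by
  unfold pvSeg
  have hs : s < xs.length := by omega
  rw [List.drop_eq_getElem_cons hs]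
  have h1 : e + 1 - s = (e - 1 + 1 - (s + 1)) + 1 + 1 := by omega
  rw [h1, List.take_succ_cons]
  congr 1
  · simp [List.getD, List.getElem?_eq_getElem hs]
  · rw [List.take_add_one]
    congr 1
    rw [List.getElem?_drop, show s + 1 + (e - 1 + 1 - (s + 1)) = e from by omega,
        List.getElem?_eq_getElem he]
    simp [List.getD, List.getElem?_eq_getElem he]

-- count of non-equal elements of a list, as an Int, via B's fold
lemma foldl_count (xs : List Int) (val : Int) (c : Int) :
    xs.foldl (fun acc x => if x ≠ val then acc + 1 else acc) c
      = c + (xs.countP (fun x => x != val) : Int) := by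
  induction xs generalizing c with
  | nil => simp
  | cons y ys ih =>
    simp only [List.foldl_cons, List.countP_cons, ih]
    by_cases h : y = val
    · simp [h]
    · simp [h]; ring

lemma pvLoopA_eq (xs : List Int) (val : Int) :
    ∀ n s e c, e + 1 - s = n → e < xs.length →
      pvLoopA xs val s e c = c + ((pvSeg xs s e).countP (fun x => x != val) : Int) := by
  intro n
  induction n using Nat.strong_induction_on with
  | _ n ih =>
    intro s e c hn he
    rw [pvLoopA]
    by_cases hse : s ≤ e
    · simp only [dif_pos hse]
      rcases Nat.lt_or_ge s e with hlt | hge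
      · -- s < e
        have hrec := fun c' => ih (e - 1 + 1 - (s + 1)) (by omega) (s + 1) (e - 1) c' rfl (by omega)
        rw [if_pos (by omega : s ≠ e), hrec, pvSeg_step xs s e hlt he]
        simp only [List.countP_cons, List.countP_append, List.getD]
        split_ifs <;> simp_all
        all_goals omega
      · -- s = e
        have hseq : s = e := by omega
        subst hseq
        have hrec := fun c' => ih (s - 1 + 1 - (s + 1)) (by omega) (s + 1) (s - 1) c' rfl (by omega)
        rw [if_neg (by simp), hrec]
        rw [pvSeg_single xs s he]
        have hempty : pvSeg xs (s + 1) (s - 1) = [] := by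
          unfold pvSeg; simp [show s - 1 + 1 - (s + 1) = 0 by omega]
        rw [hempty]
        simp only [List.countP_cons, List.countP_nil, List.getD]
        split_ifs <;> simp_all
        all_goals omega
    · simp only [dif_neg hse]
      have : e + 1 - s = 0 := by omega
      have hempty : pvSeg xs s e = [] := by unfold pvSeg; simp [this]
      simp [hempty]

lemma pvSeg_full (xs : List Int) (h : xs ≠ []) : pvSeg xs 0 (xs.length - 1) = xs := by
  unfold pvSeg
  have : xs.length - 1 + 1 - 0 = xs.length := by
    have := List.length_pos_iff.mpr h; omega
  simp [this]

-- ===== VERDICT (by name: the statement is the Claim_ definition above) =====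
theorem getCountOfNonEqualElements_spec : Claim_equal_getCountOfNonEqualElements := by
  intro nums val _
  cases nums with
  | none => rfl
  | some xs =>
    show Spec_getCountOfNonEqualElements (some xs) val (getCountOfNonEqualElements (some xs) val)
    unfold Spec_getCountOfNonEqualElements
    simp only [getCountOfNonEqualElements, getCountOfNonEqualElements_alt]
    by_cases hxs : xs.length = 0
    · have : xs = [] := List.length_eq_zero_iff.mp hxs
      subst this; simp
    · have hne : xs ≠ [] := by intro h; subst h; simp at hxs
      rw [if_neg hxs,
        pvLoopA_eq xs val (xs.length - 1 + 1 - 0) 0 (xs.length - 1) 0 rfl (by omega),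
        pvSeg_full xs hne, foldl_count]
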